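-- pv_equiv track=rewrite | github.com/LampSteven17/HillCipher-Python | hillCipher.py | getNewCharsFromHillCipher
-- ===== SOURCE A (Python) =====
-- def getNewCharsFromHillCipher(mtx,txt):
--     numbers = charsToNums(txt)
--     newNums = []
--
--     for i in numbers:
--         newNums.append([
--         ((mtx[0][0] * i[0]) + (mtx[0][1] * i[1])) % 26,
--         ((mtx[1][0] * i[0]) + (mtx[1][1] * i[1])) % 26
--         ])
--
--     return numsToChars(newNums)
--
-- def charsToNums(txt):
--     numArr = []
--     numsFormat = []
--     for i in txt:
--         for j in [char for char in (''.join(i))]: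
--             numArr.append(ord(j)-96)
--
--     for i in range(0,len(numArr),2):
--         try:
--             numsFormat.append([numArr[i],numArr[i+1]])
--         except IndexError:
--             numsFormat.append([numArr[i],numArr[i]])
--
--
--     return numsFormat
--
-- def numsToChars(nums):
--     stringy = ""
--
--     for i in nums:
--         for j in i:
--             stringy+=chr(j+96)
--
--
--
--     return stringy.replace('`','z')
-- ===== SOURCE B (Python) =====
-- def getNewCharsFromHillCipher(mtx, txt):
--     stream = [c for w in txt for c in w]
--     if not stream:
--         return ""
--     def enc(v):
--         return 'z' if v == 0 else chr(v + 96)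
--     table = [[enc((mtx[0][0] * a + mtx[0][1] * b) % 26) + enc((mtx[1][0] * a + mtx[1][1] * b) % 26)
--               for b in range(26)]
--              for a in range(26)]
--     out = []
--     pending = None
--     for c in stream:
--         v = (ord(c) - 96) % 26
--         if pending is None:
--             pending = v
--         else:
--             out.append(table[pending][v])
--             pending = None
--     if pending is not None:
--         out.append(table[pending][pending])
--     return ''.join(out)
-- ===== Notes on version B (the rewrite author's own statement) =====
-- stated objective: faster
-- what changed: Instead of A's staged list pipeline (code list, index-paired lists via try/except, cipher-pair list, string concat, then a replace pass), B precomputes a 26x26 lookup table of final two-letter cipher strings (with the backtick-to-z fix baked into each entry) and makes one streaming pass over the characters with a one-slot pending buffer, emitting one table entry per pair; no intermediate numeric lists and no replace pass.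
import Mathlib
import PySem

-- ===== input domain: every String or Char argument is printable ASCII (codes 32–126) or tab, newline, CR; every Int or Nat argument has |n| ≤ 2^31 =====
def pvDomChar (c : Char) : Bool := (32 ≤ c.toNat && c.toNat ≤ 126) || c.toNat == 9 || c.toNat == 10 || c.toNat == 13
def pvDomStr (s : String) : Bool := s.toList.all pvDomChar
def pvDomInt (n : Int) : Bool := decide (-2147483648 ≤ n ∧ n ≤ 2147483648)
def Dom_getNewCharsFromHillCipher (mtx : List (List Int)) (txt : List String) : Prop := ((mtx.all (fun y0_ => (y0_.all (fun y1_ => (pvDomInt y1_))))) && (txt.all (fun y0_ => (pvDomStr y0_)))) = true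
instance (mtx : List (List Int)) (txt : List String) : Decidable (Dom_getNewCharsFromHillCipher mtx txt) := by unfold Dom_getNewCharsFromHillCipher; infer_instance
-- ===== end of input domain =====

-- ===== PORT A =====
-- B replaces A's staged list pipeline by a precomputed 26x26 table of final two-letter strings
-- plus one streaming pass with a pending slot; return values proved equal on Pre_.
def pvCharsToNums (txt : List String) : List (List Int) :=
  let numArr : List Int :=
    txt.foldl (fun acc i => i.toList.foldl (fun a j => a ++ [(j.toNat : Int) - 96]) acc) []
  let numsFormat : List (List Int) :=
    (PySem.List.pyRange 0 numArr.length 2).foldl (fun acc i =>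
      match PySem.List.pyGet? numArr i, PySem.List.pyGet? numArr (i + 1) with
      | some a, some b => acc ++ [[a, b]]
      | some a, none   => acc ++ [[a, a]]
      | none,   _      => acc) []
  numsFormat

def pvNumsToChars (nums : List (List Int)) : String :=
  let stringy : String :=
    nums.foldl (fun s i => i.foldl (fun s2 j => s2 ++ String.singleton (Char.ofNat (j + 96).toNat)) s) ""
  PySem.Str.replace stringy "`" "z"

def getNewCharsFromHillCipher (mtx : List (List Int)) (txt : List String) : String :=
  let numbers := pvCharsToNums txt
  -- mtx[r][c] ported with pyGetD; Pre_ guarantees the accesses are in range whenever the loop runs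
  let newNums : List (List Int) :=
    numbers.foldl (fun acc i =>
      acc ++ [[PySem.Int.mod (PySem.List.pyGetD (PySem.List.pyGetD mtx 0 []) 0 0 * PySem.List.pyGetD i 0 0
                 + PySem.List.pyGetD (PySem.List.pyGetD mtx 0 []) 1 0 * PySem.List.pyGetD i 1 0) 26,
               PySem.Int.mod (PySem.List.pyGetD (PySem.List.pyGetD mtx 1 []) 0 0 * PySem.List.pyGetD i 0 0
                 + PySem.List.pyGetD (PySem.List.pyGetD mtx 1 []) 1 0 * PySem.List.pyGetD i 1 0) 26]]) []
  pvNumsToChars newNums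

-- ===== PORT B =====
-- enc(v): the final output letter for cipher value v (the '`'→'z' fix baked in)
def pvEnc (v : Int) : String :=
  if v = 0 then "z" else String.singleton (Char.ofNat (v + 96).toNat)

-- the loop body of B's streaming pass (pending slot in st.2)
def pvStep (table : List (List String)) (st : List String × Option Int) (c : Char) : List String × Option Int :=
  let v := PySem.Int.mod ((c.toNat : Int) - 96) 26
  match st.2 with
  | none => (st.1, some v)
  | some p => (st.1 ++ [PySem.List.pyGetD (PySem.List.pyGetD table p []) v ""], none)

-- after the loop: a leftover pending letter pairs with itself
def pvFinish (table : List (List String)) (st : List String × Option Int) : List String :=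
  match st.2 with
  | some p => st.1 ++ [PySem.List.pyGetD (PySem.List.pyGetD table p []) p ""]
  | none => st.1

def getNewCharsFromHillCipher_alt (mtx : List (List Int)) (txt : List String) : String :=
  let stream := txt.flatMap (fun w => w.toList)
  match stream with
  | [] => ""
  | _ =>
    -- table[a][b] = the two-letter ciphertext of the (already reduced) pair (a, b)
    let table : List (List String) :=
      (PySem.List.pyRange 0 26 1).map (fun a =>
        (PySem.List.pyRange 0 26 1).map (fun b =>
          pvEnc (PySem.Int.mod (PySem.List.pyGetD (PySem.List.pyGetD mtx 0 []) 0 0 * a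
                   + PySem.List.pyGetD (PySem.List.pyGetD mtx 0 []) 1 0 * b) 26)
          ++ pvEnc (PySem.Int.mod (PySem.List.pyGetD (PySem.List.pyGetD mtx 1 []) 0 0 * a
                   + PySem.List.pyGetD (PySem.List.pyGetD mtx 1 []) 1 0 * b) 26)))
    let st := stream.foldl (pvStep table) ([], none)
    PySem.Str.join "" (pvFinish table st)

-- ===== PRECONDITION & SPEC =====
-- Pre_ is exactly where the Python A returns: either there is no character at all (the cipher loop never
-- runs and mtx is never touched), or mtx has the 2x2 entries mtx[0][0], mtx[0][1], mtx[1][0], mtx[1][1]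
-- (otherwise A raises IndexError).
def Pre_getNewCharsFromHillCipher (mtx : List (List Int)) (txt : List String) : Prop :=
  txt.all (fun s => s.isEmpty) = true ∨
    (2 ≤ mtx.length ∧ 2 ≤ (mtx.getD 0 []).length ∧ 2 ≤ (mtx.getD 1 []).length)
instance (mtx : List (List Int)) (txt : List String) : Decidable (Pre_getNewCharsFromHillCipher mtx txt) := by
  unfold Pre_getNewCharsFromHillCipher; infer_instance
def pvWitness_getNewCharsFromHillCipher : List (List Int) × List String := ([[1, 2], [3, 4]], ["abc"])
def Spec_getNewCharsFromHillCipher (mtx : List (List Int)) (txt : List String) (out : String) : Prop := out = getNewCharsFromHillCipher_alt mtx txt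
instance (mtx : List (List Int)) (txt : List String) (out : String) : Decidable (Spec_getNewCharsFromHillCipher mtx txt out) := by unfold Spec_getNewCharsFromHillCipher; infer_instance

-- ===== CLAIM (what is proved, stated in full; the proofs are below) =====
def Claim_equal_getNewCharsFromHillCipher : Prop := ∀ (mtx : List (List Int)) (txt : List String), Dom_getNewCharsFromHillCipher mtx txt → Pre_getNewCharsFromHillCipher mtx txt → Spec_getNewCharsFromHillCipher mtx txt (getNewCharsFromHillCipher mtx txt)

-- ===== LEMMAS AND PROOFS =====

-- the flat code list A starts from
def pvFlat (txt : List String) : List Int :=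
  txt.flatMap (fun w => w.toList.map (fun c => (c.toNat : Int) - 96))

theorem pvNumArr_eq (txt : List String) :
    txt.foldl (fun acc i => i.toList.foldl (fun a j => a ++ [(j.toNat : Int) - 96]) acc) [] = pvFlat txt := by
  have h : ∀ (acc : List Int),
      txt.foldl (fun acc i => i.toList.foldl (fun a j => a ++ [(j.toNat : Int) - 96]) acc) acc
        = acc ++ pvFlat txt := by
    intro acc
    have hrw : ∀ (a : List Int) (w : String),
        w.toList.foldl (fun a j => a ++ [(j.toNat : Int) - 96]) a
          = a ++ w.toList.map (fun c => (c.toNat : Int) - 96) := by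
      intro a w
      exact PySem.List.foldl_append_singleton_eq_map (f := fun (c : Char) => (c.toNat : Int) - 96) (l := w.toList) (acc := a)
    calc txt.foldl (fun acc i => i.toList.foldl (fun a j => a ++ [(j.toNat : Int) - 96]) acc) acc
        = txt.foldl (fun acc w => acc ++ w.toList.map (fun c => (c.toNat : Int) - 96)) acc := by
          apply List.foldl_ext
          intro a w _
          exact hrw a w
      _ = acc ++ pvFlat txt :=
          PySem.List.foldl_append_eq_flatMap (g := fun (w : String) => w.toList.map (fun c => (c.toNat : Int) - 96)) (l := txt) (acc := acc)
  simpa using h []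

-- A's pair grouping, recursively
def pvPairs : List Int → List (List Int)
  | [] => []
  | [a] => [[a, a]]
  | a :: b :: r => [a, b] :: pvPairs r

theorem pyRange_two_cons (a b : Int) (h : a < b) :
    PySem.List.pyRange a b 2 = a :: PySem.List.pyRange (a + 2) b 2 := by
  rw [PySem.List.pyRange_of_pos a b (by norm_num), PySem.List.pyRange_of_pos (a + 2) b (by norm_num)]
  by_cases h2 : a + 2 < b
  · have hn : ((b - a + 2 - 1) / 2).toNat = ((b - (a + 2) + 2 - 1) / 2).toNat + 1 := by omega
    simp only [if_pos h, if_pos h2, hn, List.range_succ_eq_map, List.map_cons, List.map_map,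
      Nat.cast_zero, mul_zero, add_zero]
    congr 1
    apply List.map_congr_left
    intro k _
    simp only [Function.comp_apply, Nat.succ_eq_add_one]
    push_cast
    ring
  · have hn : ((b - a + 2 - 1) / 2).toNat = 1 := by omega
    simp [if_pos h, if_neg h2, hn, List.range_succ]

theorem pyRange_two_nil (a b : Int) (h : b ≤ a) : PySem.List.pyRange a b 2 = [] := by
  rw [PySem.List.pyRange_of_pos a b (by norm_num)]
  simp [show ¬ a < b by omega]

theorem pvPairs_fold (l pre : List Int) (acc : List (List Int)) :
    (PySem.List.pyRange (pre.length : Int) (((pre ++ l).length : Nat) : Int) 2).foldl (fun acc i =>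
      match PySem.List.pyGet? (pre ++ l) i, PySem.List.pyGet? (pre ++ l) (i + 1) with
      | some a, some b => acc ++ [[a, b]]
      | some a, none   => acc ++ [[a, a]]
      | none,   _      => acc) acc = acc ++ pvPairs l := by
  induction l using pvPairs.induct generalizing pre acc with
  | case1 =>
    rw [pyRange_two_nil _ _ (by simp)]
    simp [pvPairs]
  | case2 a =>
    have h1 : (pre.length : Int) < (((pre ++ [a]).length : Nat) : Int) := by simp
    rw [pyRange_two_cons _ _ h1, pyRange_two_nil _ _ (by simp)]
    simp only [List.foldl_cons, List.foldl_nil]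
    rw [PySem.List.pyGet?_append_length]
    have h2 : PySem.List.pyGet? (pre ++ [a]) ((pre.length : Int) + 1) = none := by
      rw [show ((pre.length : Int) + 1) = ((pre.length + 1 : Nat) : Int) by push_cast; ring,
        PySem.List.pyGet?_natCast]
      simp
    rw [h2]
    simp [pvPairs]
  | case3 a b r ih =>
    have h1 : (pre.length : Int) < (((pre ++ a :: b :: r).length : Nat) : Int) := by
      simp; omega
    rw [pyRange_two_cons _ _ h1]
    simp only [List.foldl_cons]
    have hga : PySem.List.pyGet? (pre ++ a :: b :: r) (pre.length : Int) = some a :=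
      PySem.List.pyGet?_append_length _ _ _
    have hgb : PySem.List.pyGet? (pre ++ a :: b :: r) ((pre.length : Int) + 1) = some b := by
      have := PySem.List.pyGet?_append_right pre (a :: b :: r) 1
      simpa using this
    rw [hga, hgb]
    have hre : pre ++ a :: b :: r = (pre ++ [a, b]) ++ r := by simp
    have hlen : ((pre.length : Int) + 2) = (((pre ++ [a, b]).length : Nat) : Int) := by
      simp
    rw [hre, hlen]
    rw [ih (pre := pre ++ [a, b]) (acc := acc ++ [[a, b]])]
    simp [pvPairs]

theorem pvCharsToNums_eq (txt : List String) : pvCharsToNums txt = pvPairs (pvFlat txt) := by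
  unfold pvCharsToNums
  rw [pvNumArr_eq]
  simpa using pvPairs_fold (pvFlat txt) [] []

-- A's cipher loop is a map over the pairs
theorem pvNewNums_eq (f g : Int → Int → Int) (nums : List (List Int)) (acc : List (List Int)) :
    nums.foldl (fun acc i =>
      acc ++ [[f (PySem.List.pyGetD i 0 0) (PySem.List.pyGetD i 1 0),
               g (PySem.List.pyGetD i 0 0) (PySem.List.pyGetD i 1 0)]]) acc
      = acc ++ nums.map (fun i => [f (PySem.List.pyGetD i 0 0) (PySem.List.pyGetD i 1 0),
                                   g (PySem.List.pyGetD i 0 0) (PySem.List.pyGetD i 1 0)]) :=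
  PySem.List.foldl_append_singleton_eq_map _ _ _

-- A's numsToChars builds one list of chars
theorem pvStringy_eq (nums : List (List Int)) (s : String) :
    nums.foldl (fun s i => i.foldl (fun s2 j => s2 ++ String.singleton (Char.ofNat (j + 96).toNat)) s) s
      = s ++ String.ofList (nums.flatMap (fun i => i.map (fun j => Char.ofNat (j + 96).toNat))) := by
  have hone : ∀ (i : List Int) (s : String),
      i.foldl (fun s2 j => s2 ++ String.singleton (Char.ofNat (j + 96).toNat)) s
        = s ++ String.ofList (i.map (fun j => Char.ofNat (j + 96).toNat)) := by
    intro i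
    induction i with
    | nil =>
      intro s
      apply String.toList_inj.mp
      simp
    | cons j t ih2 =>
      intro s
      simp only [List.foldl_cons, List.map_cons]
      rw [ih2]
      apply String.toList_inj.mp
      simp [String.singleton]
  induction nums generalizing s with
  | nil =>
    apply String.toList_inj.mp
    simp
  | cons i t ih =>
    simp only [List.foldl_cons, List.flatMap_cons]
    rw [hone, ih]
    apply String.toList_inj.mp
    simp

-- single-char replace is a character map
theorem pvReplace_go_single (o n : Char) :
    ∀ (fuel : Nat) (l acc : List Char), l.length ≤ fuel →
      PySem.Chars.replace.go [o] [n] fuel l acc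
        = acc.reverse ++ l.map (fun c => if c = o then n else c) := by
  intro fuel
  induction fuel with
  | zero =>
    intro l acc h
    have : l = [] := List.length_eq_zero_iff.mp (Nat.le_zero.mp h)
    subst this
    simp [PySem.Chars.replace.go]
  | succ k ih =>
    intro l acc h
    cases l with
    | nil => simp [PySem.Chars.replace.go]
    | cons c t =>
      rw [PySem.Chars.replace.go]
      by_cases hc : c = o
      · subst hc
        have hp : List.isPrefixOf [c] (c :: t) = true := by simp [List.isPrefixOf]
        rw [if_pos hp]
        have hd : List.drop [c].length (c :: t) = t := by simp
        rw [hd, ih t _ (by simp at h; omega)]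
        simp
      · have hp : List.isPrefixOf [o] (c :: t) = false := by
          simp [List.isPrefixOf]
          exact fun he => absurd he.symm hc
        rw [hp]
        simp only [Bool.false_eq_true, if_false]
        rw [ih t _ (by simp at h; omega)]
        simp [hc]

theorem pvReplace_single (cs : List Char) (o n : Char) :
    PySem.Chars.replace cs [o] [n] = cs.map (fun c => if c = o then n else c) := by
  rw [PySem.Chars.replace]
  simp only [List.isEmpty_cons, Bool.false_eq_true, if_false]
  exact pvReplace_go_single o n cs.length cs [] le_rfl

-- the final letter for a cipher value 0 ≤ j < 26: A's chr(j+96) then '`'→'z' = B's enc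
def pvOutc (j : Int) : Char := if j = 0 then 'z' else Char.ofNat (j + 96).toNat

theorem pvOutc_eq (j : Int) (h0 : 0 ≤ j) (h26 : j < 26) :
    (if Char.ofNat (j + 96).toNat = '`' then 'z' else Char.ofNat (j + 96).toNat) = pvOutc j := by
  unfold pvOutc
  by_cases hj : j = 0
  · subst hj; decide
  · have hv : (j + 96).toNat < 0xd800 := by omega
    have ht : (Char.ofNat (j + 96).toNat).toNat = (j + 96).toNat := by
      unfold Char.ofNat
      rw [dif_pos]
      · rfl
      · exact Or.inl hv
    have hne : Char.ofNat (j + 96).toNat ≠ '`' := by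
      intro he
      have := congrArg Char.toNat he
      rw [ht] at this
      have : (j + 96).toNat = 96 := this
      omega
    rw [if_neg hne, if_neg hj]

theorem pvEnc_toList (j : Int) : (pvEnc j).toList = [pvOutc j] := by
  unfold pvEnc pvOutc
  by_cases hj : j = 0
  · simp [hj]
  · simp [hj, String.singleton]

-- modular reduction of the pair before the matrix product does not change the result
theorem pvMod_reduce (m m' a b : Int) :
    PySem.Int.mod (m * PySem.Int.mod a 26 + m' * PySem.Int.mod b 26) 26
      = PySem.Int.mod (m * a + m' * b) 26 := by
  rw [PySem.Int.mod_eq_emod_of_pos (by norm_num : (0:Int) < 26),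
    PySem.Int.mod_eq_emod_of_pos (by norm_num : (0:Int) < 26),
    PySem.Int.mod_eq_emod_of_pos (by norm_num : (0:Int) < 26),
    PySem.Int.mod_eq_emod_of_pos (by norm_num : (0:Int) < 26)]
  conv_lhs => rw [Int.add_emod, Int.mul_emod, Int.mul_emod m']
  conv_rhs => rw [Int.add_emod, Int.mul_emod, Int.mul_emod m']
  rw [Int.emod_emod_of_dvd _ dvd_rfl, Int.emod_emod_of_dvd _ dvd_rfl]

-- B's table lookup, for reduced indices
theorem pvTable_get (f : Int → Int → String) (p v : Int)
    (hp0 : 0 ≤ p) (hp : p < 26) (hv0 : 0 ≤ v) (hv : v < 26) :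
    PySem.List.pyGetD (PySem.List.pyGetD
        ((PySem.List.pyRange 0 26 1).map (fun a => (PySem.List.pyRange 0 26 1).map (fun b => f a b))) p []) v ""
      = f p v := by
  rw [PySem.List.pyGetD_map_pyRange_of_nonneg _ 26 p _ hp0 hp,
    PySem.List.pyGetD_map_pyRange_of_nonneg _ 26 v _ hv0 hv]

-- generic two-at-a-time structure, to induct over the char stream in pairs
def pvChunks {A : Type} : List A → List (A × A)
  | [] => []
  | [a] => [(a, a)]
  | a :: b :: r => (a, b) :: pvChunks r

-- B's streaming pass, recursively: one table entry per pair of reduced values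
def pvStream (T : Int → Int → String) : List Int → List String
  | [] => []
  | [a] => [T a a]
  | a :: b :: r => T a b :: pvStream T r

theorem pvStream_fold (table : List (List String)) (l : List Char) (out : List String) :
    pvFinish table (l.foldl (pvStep table) (out, none))
      = out ++ pvStream (fun p v => PySem.List.pyGetD (PySem.List.pyGetD table p []) v "")
          (l.map (fun c => PySem.Int.mod ((c.toNat : Int) - 96) 26)) := by
  induction l using pvChunks.induct generalizing out with
  | case1 => simp [pvStream, pvFinish]
  | case2 a => simp [pvStream, pvStep, pvFinish]
  | case3 a b r ih =>
    simp only [List.foldl_cons, List.map_cons, pvStream]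
    rw [show pvStep table (out, none) a = (out, some (PySem.Int.mod ((a.toNat : Int) - 96) 26)) from rfl]
    rw [show pvStep table (out, some (PySem.Int.mod ((a.toNat : Int) - 96) 26)) b
        = (out ++ [PySem.List.pyGetD (PySem.List.pyGetD table (PySem.Int.mod ((a.toNat : Int) - 96) 26) [])
            (PySem.Int.mod ((b.toNat : Int) - 96) 26) ""], none) from rfl]
    rw [ih]
    simp

-- a mapped stream pairs up like the underlying list
theorem pvStream_of_pairs (T : Int → Int → String) (f : Int → Int) (l : List Int) :
    ((pvStream T (l.map f)).map String.toList).flatten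
      = (pvPairs l).flatMap (fun i =>
          (T (f (PySem.List.pyGetD i 0 0)) (f (PySem.List.pyGetD i 1 0))).toList) := by
  induction l using pvChunks.induct with
  | case1 => simp [pvStream, pvPairs]
  | case2 a => simp [pvStream, pvPairs, PySem.List.pyGetD, PySem.List.pyGet?, PySem.List.pyIdx?]
  | case3 a b r ih =>
    simp only [List.map_cons, pvStream, pvPairs, List.flatMap_cons, List.flatten_cons, ih]
    simp [PySem.List.pyGetD, PySem.List.pyGet?, PySem.List.pyIdx?]

-- join with empty separator is concatenation of the char lists
theorem pvJoin_empty (css : List (List Char)) : PySem.Chars.join [] css = css.flatten := by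
  induction css with
  | nil => simp [PySem.Chars.join, List.intercalate]
  | cons p t ih =>
    cases t with
    | nil => simp [PySem.Chars.join_singleton]
    | cons q r =>
      rw [PySem.Chars.join_cons_cons]
      simp only [List.flatten_cons, List.append_nil]
      rw [← List.flatten_cons, ← ih]

theorem pvJoin_toList (parts : List String) :
    (PySem.Str.join "" parts).toList = (parts.map String.toList).flatten := by
  rw [PySem.Str.toList_join]
  simpa using pvJoin_empty (parts.map String.toList)

-- ===== VERDICT (by name: the statement is the Claim_ definition above) =====
theorem getNewCharsFromHillCipher_spec : Claim_equal_getNewCharsFromHillCipher := by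
  intro mtx txt _ _
  unfold Spec_getNewCharsFromHillCipher getNewCharsFromHillCipher getNewCharsFromHillCipher_alt
  rw [pvCharsToNums_eq]
  cases hs : txt.flatMap (fun w => w.toList) with
  | nil =>
    have hf : pvFlat txt = [] := by
      unfold pvFlat
      rw [show (fun (w : String) => w.toList.map (fun c => (c.toNat : Int) - 96))
            = (fun (w : String) => (w.toList).map (fun c => (c.toNat : Int) - 96)) from rfl]
      rw [← List.map_flatMap, hs]
      rfl
    rw [hf]
    simp only [pvPairs, List.foldl_nil, pvNumsToChars]
    apply String.toList_inj.mp
    simp only [PySem.Str.toList_replace]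
    decide
  | cons c0 cr =>
    simp only []
    apply String.toList_inj.mp
    rw [pvNewNums_eq
      (f := fun x y => PySem.Int.mod (PySem.List.pyGetD (PySem.List.pyGetD mtx 0 []) 0 0 * x + PySem.List.pyGetD (PySem.List.pyGetD mtx 0 []) 1 0 * y) 26)
      (g := fun x y => PySem.Int.mod (PySem.List.pyGetD (PySem.List.pyGetD mtx 1 []) 0 0 * x + PySem.List.pyGetD (PySem.List.pyGetD mtx 1 []) 1 0 * y) 26)]
    unfold pvNumsToChars
    simp only [pvStringy_eq, List.nil_append]
    rw [pvStream_fold]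
    rw [← hs, List.map_flatMap]
    simp only [PySem.Str.toList_replace]
    have hLHS : ("" ++ String.ofList
        (List.flatMap (fun i => List.map (fun j => Char.ofNat (j + 96).toNat) i)
          (List.map
            (fun i =>
              [PySem.Int.mod
                  (PySem.List.pyGetD (PySem.List.pyGetD mtx 0 []) 0 0 * PySem.List.pyGetD i 0 0 +
                    PySem.List.pyGetD (PySem.List.pyGetD mtx 0 []) 1 0 * PySem.List.pyGetD i 1 0) 26,
                PySem.Int.mod
                  (PySem.List.pyGetD (PySem.List.pyGetD mtx 1 []) 0 0 * PySem.List.pyGetD i 0 0 +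
                    PySem.List.pyGetD (PySem.List.pyGetD mtx 1 []) 1 0 * PySem.List.pyGetD i 1 0) 26])
            (pvPairs (pvFlat txt))))).toList
        = List.flatMap (fun i => List.map (fun j => Char.ofNat (j + 96).toNat)
            [PySem.Int.mod
                (PySem.List.pyGetD (PySem.List.pyGetD mtx 0 []) 0 0 * PySem.List.pyGetD i 0 0 +
                  PySem.List.pyGetD (PySem.List.pyGetD mtx 0 []) 1 0 * PySem.List.pyGetD i 1 0) 26,
              PySem.Int.mod
                (PySem.List.pyGetD (PySem.List.pyGetD mtx 1 []) 0 0 * PySem.List.pyGetD i 0 0 +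
                  PySem.List.pyGetD (PySem.List.pyGetD mtx 1 []) 1 0 * PySem.List.pyGetD i 1 0) 26])
            (pvPairs (pvFlat txt)) := by
      simp [List.flatMap_map]
    rw [hLHS, show "`".toList = ['`'] from by decide, show "z".toList = ['z'] from by decide,
      pvReplace_single, List.map_flatMap]
    have hVals : (List.flatMap (fun a => List.map (fun c => PySem.Int.mod ((c.toNat : Int) - 96) 26) a.toList) txt)
        = (pvFlat txt).map (fun x => PySem.Int.mod x 26) := by
      unfold pvFlat
      rw [List.map_flatMap]
      simp [List.map_map, Function.comp_def]
    rw [hVals, List.nil_append, pvJoin_toList, pvStream_of_pairs]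
    congr 1
    funext i
    rw [pvTable_get _ _ _ (PySem.Int.mod_nonneg _ (by norm_num)) (PySem.Int.mod_lt _ (by norm_num))
      (PySem.Int.mod_nonneg _ (by norm_num)) (PySem.Int.mod_lt _ (by norm_num))]
    rw [pvMod_reduce, pvMod_reduce, String.toList_append, pvEnc_toList, pvEnc_toList]
    simp only [List.map_cons, List.map_nil]
    rw [pvOutc_eq _ (PySem.Int.mod_nonneg _ (by norm_num)) (PySem.Int.mod_lt _ (by norm_num)),
      pvOutc_eq _ (PySem.Int.mod_nonneg _ (by norm_num)) (PySem.Int.mod_lt _ (by norm_num))]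
    rfl
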